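-- pv_equiv track=rewrite | github.com/Negin-Yazdani-Motlagh/MyRepo-Archive | Combined_All_ V11_v9.1/compare_categories_ALL.py | count_skills_in_text
-- ===== SOURCE A (Python) =====
-- from collections import defaultdict
--
-- def count_skills_in_text(text, skills_dict):
--     text = text.lower()
--     skill_counts = defaultdict(lambda: defaultdict(int))
--
--     for category, skills in skills_dict.items():
--         for skill in skills:
--             if skill in text:
--                 skill_counts[category][skill] += 1
--
--     return skill_counts
-- ===== SOURCE B (Python) =====
-- def count_skills_in_text(text, skills_dict):
--     t = text.lower()
--     # Different matching algorithm: instead of running a substring search per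
--     # skill, index the text once per distinct skill length by collecting every
--     # window of that length into a set; a skill is present iff it equals one of
--     # the text's windows of its own length (set membership, no substring scan).
--     lengths = {len(s) for skills in skills_dict.values() for s in skills}
--     windows = {L: {t[i:i + L] for i in range(len(t) - L + 1)} for L in lengths}
--     result = {}
--     for category, skills in skills_dict.items():
--         counts = {}
--         for s in skills:
--             if s in windows[len(s)]:  # len(s) is always a key of windows
--                 counts[s] = counts.get(s, 0) + 1
--         if counts:
--             result[category] = counts
--     return result
-- ===== Notes on version B (the rewrite author's own statement) =====
-- stated objective: faster
-- what changed: A runs Python's substring search over the lowered text once per skill occurrence; B never does a substring search: it indexes the text once per distinct skill length, collecting every window of that length into a hash set, and then decides presence of each skill by a single O(1)-expected set-membership test against the windows of its own length (a Rabin-Karp-style window index instead of per-pattern scanning).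
import Mathlib
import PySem

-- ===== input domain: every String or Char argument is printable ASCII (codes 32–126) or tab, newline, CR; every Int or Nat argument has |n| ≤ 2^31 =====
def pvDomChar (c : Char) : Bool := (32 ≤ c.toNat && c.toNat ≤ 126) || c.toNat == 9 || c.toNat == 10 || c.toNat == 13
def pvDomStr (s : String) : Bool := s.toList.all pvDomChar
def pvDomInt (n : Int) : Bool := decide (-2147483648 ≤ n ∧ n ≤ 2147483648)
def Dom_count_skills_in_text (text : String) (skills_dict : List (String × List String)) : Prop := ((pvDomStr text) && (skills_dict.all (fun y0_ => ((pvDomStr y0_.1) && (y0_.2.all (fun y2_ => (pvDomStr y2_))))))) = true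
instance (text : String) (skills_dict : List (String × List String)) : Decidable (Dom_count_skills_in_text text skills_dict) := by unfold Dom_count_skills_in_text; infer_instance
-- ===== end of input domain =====

-- B replaces A's per-skill substring search by a window index: the lowered text is
-- indexed once per distinct skill length (the set of all its windows of that length)
-- and each skill is decided by one set-membership test; objective: alternative.

-- ===== PORT A =====
def count_skills_in_text (text : String) (skills_dict : List (String × List String)) : List (String × List (String × Int)) :=
  let t := PySem.Str.lower text
  let skill_counts : PySem.Dict String (PySem.Dict String Int) :=
    (PySem.Dict.ofList skills_dict).items.foldl
      (fun sc p =>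
        p.2.foldl
          (fun sc skill =>
            if PySem.Str.isIn skill t then
              sc.insert p.1 ((sc.getD p.1 PySem.Dict.empty).modify skill 0 (· + 1))
            else sc)
          sc)
      PySem.Dict.empty
  skill_counts.items.map (fun r => (r.1, r.2.items))

-- ===== PORT B =====
def count_skills_in_text_alt (text : String) (skills_dict : List (String × List String)) : List (String × List (String × Int)) :=
  let t := PySem.Str.lower text
  let its := (PySem.Dict.ofList skills_dict).items
  let lengths : PySem.Set Int := PySem.Set.ofList ((its.flatMap (·.2)).map PySem.Str.len)
  let windows : PySem.Dict Int (PySem.Set String) :=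
    lengths.foldl
      (fun d L => d.insert L (PySem.Set.ofList
        ((PySem.List.pyRange 0 (PySem.Str.len t - L + 1) 1).map
          (fun i => PySem.Str.slice t (some i) (some (i + L))))))
      PySem.Dict.empty
  let result : PySem.Dict String (List (String × Int)) :=
    its.foldl
      (fun out p =>
        let counts := p.2.foldl
          (fun c s =>
            -- windows[len(s)]: len(s) is always a key of windows, so getD is exact
            if PySem.Set.contains (windows.getD (PySem.Str.len s) (PySem.Set.ofList [])) s then
              c.insert s (c.getD s 0 + 1)
            else c)
          PySem.Dict.empty
        if counts.items.isEmpty then out else out.insert p.1 counts.items)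
      PySem.Dict.empty
  result.items

-- ===== PRECONDITION & SPEC =====
def Spec_count_skills_in_text (text : String) (skills_dict : List (String × List String)) (out : List (String × List (String × Int))) : Prop := out = count_skills_in_text_alt text skills_dict
instance (text : String) (skills_dict : List (String × List String)) (out : List (String × List (String × Int))) : Decidable (Spec_count_skills_in_text text skills_dict out) := by unfold Spec_count_skills_in_text; infer_instance

-- ===== CLAIM (what is proved, stated in full; the proofs are below) =====
def Claim_equal_count_skills_in_text : Prop := ∀ (text : String) (skills_dict : List (String × List String)), Dom_count_skills_in_text text skills_dict → Spec_count_skills_in_text text skills_dict (count_skills_in_text text skills_dict)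

-- ===== LEMMAS AND PROOFS =====

-- a key outside a fold of inserts keeps its lookup
theorem getD_foldl_insert_not_mem {κ ν : Type} [BEq κ] [LawfulBEq κ] [DecidableEq κ]
    (f : κ → ν) (ls : List κ) (d : PySem.Dict κ ν) (k : κ) (d0 : ν) (hk : k ∉ ls) :
    (ls.foldl (fun d L => d.insert L (f L)) d).getD k d0 = d.getD k d0 := by
  induction ls generalizing d with
  | nil => rfl
  | cons L rest ih =>
    simp only [List.mem_cons, not_or] at hk
    rw [List.foldl_cons, ih _ hk.2, PySem.Dict.getD_insert]
    simp [hk.1]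

-- the dict comprehension {L: f L for L in ls} looked up at a key of ls gives f of it
theorem getD_foldl_insert_mem {κ ν : Type} [BEq κ] [LawfulBEq κ] [DecidableEq κ]
    (f : κ → ν) (ls : List κ) (d : PySem.Dict κ ν) (k : κ) (d0 : ν) (hk : k ∈ ls) :
    (ls.foldl (fun d L => d.insert L (f L)) d).getD k d0 = f k := by
  induction ls generalizing d with
  | nil => cases hk
  | cons L rest ih =>
    rw [List.foldl_cons]
    by_cases h : k ∈ rest
    · exact ih _ h
    · have hkL : k = L := by rcases List.mem_cons.1 hk with h' | h'; exact h'; exact absurd h' h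
      subst hkL
      rw [getD_foldl_insert_not_mem _ _ _ _ _ h, PySem.Dict.getD_insert_self]

-- a skill equals one of the text's windows of its own length iff it is a substring
theorem mem_window_iff (t s : String) :
    (s ∈ (PySem.List.pyRange 0 (PySem.Str.len t - PySem.Str.len s + 1) 1).map
        (fun i => PySem.Str.slice t (some i) (some (i + PySem.Str.len s))))
      ↔ PySem.Str.isIn s t = true := by
  constructor
  · rintro hmem
    rcases List.mem_map.1 hmem with ⟨i, hi, heq⟩
    rcases PySem.List.mem_pyRange_one.1 hi with ⟨h0, _⟩
    rw [show PySem.Str.isIn s t = PySem.Chars.isIn s.toList t.toList from rfl,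
      ← (PySem.Chars.exists_prefix_drop_iff_isIn s.toList t.toList)]
    refine ⟨i.toNat, ?_⟩
    have htl : (PySem.Str.slice t (some i) (some (i + PySem.Str.len s))).toList
        = (t.toList.drop i.toNat).take ((i + PySem.Str.len s).toNat - i.toNat) := by
      rw [PySem.Str.toList_slice, PySem.Chars.slice_eq_listSlice,
        PySem.List.slice_toNat _ h0 (by unfold PySem.Str.len; omega)]
    have hlen : ((i + PySem.Str.len s).toNat - i.toNat) = s.toList.length := by
      unfold PySem.Str.len; omega
    rw [List.prefix_iff_eq_take]
    conv_lhs => rw [← heq]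
    rw [htl, hlen]
  · intro hin
    rw [show PySem.Str.isIn s t = PySem.Chars.isIn s.toList t.toList from rfl] at hin
    rcases (PySem.Chars.exists_prefix_drop_iff_isIn s.toList t.toList).2 hin with ⟨j, hj⟩
    have hle : s.toList.length ≤ (t.toList.drop j).length := hj.length_le
    rw [List.length_drop] at hle
    by_cases h0 : s.toList.length = 0
    · -- empty skill: window at i = 0
      refine List.mem_map.2 ⟨0, ?_, ?_⟩
      · exact PySem.List.mem_pyRange_one.2 ⟨le_refl _, by unfold PySem.Str.len; omega⟩
      · apply String.toList_inj.mp
        rw [PySem.Str.toList_slice, PySem.Chars.slice_eq_listSlice]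
        have : (0 : Int) + PySem.Str.len s = ((0 : Nat) : Int) + ((s.toList.length : Nat) : Int) := by
          unfold PySem.Str.len; omega
        rw [show (some (0 : Int)) = some (((0 : Nat) : Int)) by norm_num, this,
          PySem.List.slice_natCast_add]
        simp [List.eq_nil_of_length_eq_zero h0]
    · -- nonempty skill: window at i = j; hle forces j ≤ |t| - |s|
      have hjle : j + s.toList.length ≤ t.toList.length := by omega
      refine List.mem_map.2 ⟨(j : Int), ?_, ?_⟩
      · exact PySem.List.mem_pyRange_one.2 ⟨by positivity, by unfold PySem.Str.len; omega⟩
      · apply String.toList_inj.mp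
        rw [PySem.Str.toList_slice, PySem.Chars.slice_eq_listSlice]
        have : ((j : Int)) + PySem.Str.len s = ((j : Nat) : Int) + ((s.toList.length : Nat) : Int) := by
          unfold PySem.Str.len; omega
        rw [this, PySem.List.slice_natCast_add]
        exact ((List.prefix_iff_eq_take).1 hj).symm

-- A's inner loop over one category, restricted to the matching skills, builds the
-- running counter at key `cat` in one insert.
theorem fold_insert_modify (cat : String) (l : List String)
    (sc : PySem.Dict String (PySem.Dict String Int)) :
    l.foldl (fun sc skill => sc.insert cat ((sc.getD cat PySem.Dict.empty).modify skill 0 (· + 1))) sc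
      = if l.isEmpty then sc
        else sc.insert cat (l.foldl (fun inn s => inn.modify s 0 (· + 1)) (sc.getD cat PySem.Dict.empty)) := by
  induction l generalizing sc with
  | nil => simp
  | cons x xs ih =>
    rw [List.foldl_cons, ih]
    by_cases h : xs.isEmpty = true
    · rw [List.isEmpty_iff] at h
      subst h
      simp
    · simp [h, PySem.Dict.getD_insert_self, PySem.Dict.insert_insert_self]

-- joint induction over the (Nodup-keyed) items list, relating A's nested-dict state
-- to B's output-dict state (B's inner conditional count loop, with an abstract
-- presence test q agreeing with the substring test)
theorem joint_fold (t : String) (q : String → Bool)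
    (its : List (String × List String))
    (sc : PySem.Dict String (PySem.Dict String Int))
    (out : PySem.Dict String (List (String × Int)))
    (hnd : (its.map (·.1)).Nodup)
    (hsc : ∀ p ∈ its, sc.contains p.1 = false)
    (hout : ∀ p ∈ its, out.contains p.1 = false)
    (hq : ∀ p ∈ its, ∀ s ∈ p.2, q s = PySem.Str.isIn s t)
    (hinv : sc.items.map (fun r => (r.1, r.2.items)) = out.items) :
    (its.foldl
        (fun sc p =>
          p.2.foldl
            (fun sc skill =>
              if PySem.Str.isIn skill t then
                sc.insert p.1 ((sc.getD p.1 PySem.Dict.empty).modify skill 0 (· + 1))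
              else sc)
            sc)
        sc).items.map (fun r => (r.1, r.2.items))
      = (its.foldl
          (fun out p =>
            let counts := p.2.foldl
              (fun c s => if q s then c.insert s (c.getD s 0 + 1) else c)
              PySem.Dict.empty
            if counts.items.isEmpty then out else out.insert p.1 counts.items)
          out).items := by
  induction its generalizing sc out with
  | nil => simpa using hinv
  | cons p rest ih =>
    obtain ⟨cat, skills⟩ := p
    simp only [List.map_cons, List.nodup_cons] at hnd
    have hfilter : skills.filter q = skills.filter (fun s => PySem.Str.isIn s t) := by
      apply List.filter_congr
      intro s hs
      exact hq (cat, skills) (by simp) s hs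
    simp only [List.foldl_cons]
    have hstep : skills.foldl
        (fun sc skill =>
          if PySem.Str.isIn skill t then
            sc.insert cat ((sc.getD cat PySem.Dict.empty).modify skill 0 (· + 1))
          else sc) sc
        = (skills.filter (fun s => PySem.Str.isIn s t)).foldl
            (fun sc skill => sc.insert cat ((sc.getD cat PySem.Dict.empty).modify skill 0 (· + 1))) sc :=
      PySem.List.foldl_if_eq_foldl_filter _ _ _ _
    have hcountsB : skills.foldl
        (fun c s => if q s then c.insert s (c.getD s 0 + 1) else c) PySem.Dict.empty
        = PySem.Dict.counter (skills.filter (fun s => PySem.Str.isIn s t)) := by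
      rw [PySem.List.foldl_if_eq_foldl_filter, hfilter,
        PySem.Dict.foldl_insert_getD_add_one_eq_counter]
    rw [hstep, fold_insert_modify]
    simp only [hcountsB]
    set l := skills.filter (fun s => PySem.Str.isIn s t) with hl
    have hscfresh : sc.contains cat = false := hsc (cat, skills) (by simp)
    have houtfresh : out.contains cat = false := hout (cat, skills) (by simp)
    by_cases hle : l.isEmpty
    · -- no matching skill: both states unchanged
      have : PySem.Dict.counter l = PySem.Dict.empty := by
        rw [List.isEmpty_iff] at hle
        rw [hle]; rfl
      simp only [hle, if_pos, this]
      have : (PySem.Dict.empty : PySem.Dict String Int).items.isEmpty = true := rfl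
      simp only [this, if_pos]
      exact ih sc out hnd.2
        (fun p hp => hsc p (List.mem_cons_of_mem _ hp))
        (fun p hp => hout p (List.mem_cons_of_mem _ hp))
        (fun p hp => hq p (List.mem_cons_of_mem _ hp)) hinv
    · -- at least one matching skill: both sides append (cat, counter l)
      have hlne : l ≠ [] := by
        intro h; rw [h] at hle; simp at hle
      have hcounter : l.foldl (fun inn s => inn.modify s 0 (· + 1)) (sc.getD cat PySem.Dict.empty)
          = PySem.Dict.counter l := by
        rw [PySem.Dict.getD_of_not_contains sc _ hscfresh, PySem.Dict.counter_eq_foldl]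
      have hitemsne : (PySem.Dict.counter l).items.isEmpty = false := by
        rw [PySem.Dict.items_counter, List.isEmpty_eq_false_iff, ← List.isEmpty_eq_false_iff]
        simp only [List.isEmpty_map]
        rw [List.isEmpty_eq_false_iff]
        intro h
        exact absurd ((PySem.Set.mem_ofList l (l.head hlne)).2 (List.head_mem hlne))
          (by rw [h]; simp)
      simp only [hle, if_neg Bool.false_ne_true, hcounter, hitemsne]
      apply ih
      · exact hnd.2
      · intro p hp
        rw [PySem.Dict.contains_insert]
        have : p.1 ≠ cat := by
          intro h; exact hnd.1 (h ▸ List.mem_map_of_mem hp)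
        simp [this, hsc p (List.mem_cons_of_mem _ hp)]
      · intro p hp
        rw [PySem.Dict.contains_insert]
        have : p.1 ≠ cat := by
          intro h; exact hnd.1 (h ▸ List.mem_map_of_mem hp)
        simp [this, hout p (List.mem_cons_of_mem _ hp)]
      · intro p hp
        exact hq p (List.mem_cons_of_mem _ hp)
      · rw [PySem.Dict.items_insert_of_not_contains _ _ hscfresh,
          PySem.Dict.items_insert_of_not_contains _ _ houtfresh,
          List.map_append, hinv]
        rfl

-- ===== VERDICT (by name: the statement is the Claim_ definition above) =====
theorem count_skills_in_text_spec : Claim_equal_count_skills_in_text := by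
  unfold Claim_equal_count_skills_in_text
  intro text skills_dict _
  unfold Spec_count_skills_in_text count_skills_in_text count_skills_in_text_alt
  simp only []
  apply joint_fold
  · -- items keys are Nodup
    exact PySem.Dict.nodup_keys_ofList skills_dict
  · intro p _; exact PySem.Dict.contains_empty p.1
  · intro p _; exact PySem.Dict.contains_empty p.1
  · -- B's window-membership test agrees with the substring test on every skill
    intro p hp s hs
    have hmem : PySem.Str.len s ∈
        ((PySem.Dict.ofList skills_dict).items.flatMap (·.2)).map PySem.Str.len :=
      List.mem_map_of_mem (List.mem_flatMap.2 ⟨p, hp, hs⟩)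
    have hmem' : PySem.Str.len s ∈ PySem.Set.ofList
        (((PySem.Dict.ofList skills_dict).items.flatMap (·.2)).map PySem.Str.len) :=
      (PySem.Set.mem_ofList _ _).2 hmem
    rw [getD_foldl_insert_mem _ _ _ _ _ hmem']
    have hc : ∀ (S : PySem.Set String) (x : String),
        PySem.Set.contains S x = decide (x ∈ S) := by
      intro S x; simp [PySem.Set.contains]
    rw [hc]
    by_cases hin : PySem.Str.isIn s (PySem.Str.lower text) = true
    · rw [hin]
      exact decide_eq_true ((PySem.Set.mem_ofList _ s).2
        ((mem_window_iff (PySem.Str.lower text) s).2 hin))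
    · rw [Bool.eq_false_iff.2 hin]
      exact decide_eq_false (fun h => hin ((mem_window_iff (PySem.Str.lower text) s).1
        ((PySem.Set.mem_ofList _ s).1 h)))
  · rfl
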